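-- pv_equiv track=rewrite | github.com/LuisDiazM/evalio | cv-grader-analyzer/domain/usecases/utilities/crop_circles.py | group_circles
-- ===== SOURCE A (Python) =====
-- def group_circles(circles):
--     circles = sorted(circles, key=lambda c: (c[1], c[0]))
--     rows = []
--     current_row = []
--     last_y = None
--     for c in circles:
--         if last_y is None or abs(c[1] - last_y) < 50:
--             current_row.append(c)
--         else:
--             rows.append(sorted(current_row, key=lambda x: x[0]))
--             current_row = [c]
--         last_y = c[1]
--     if current_row:
--         rows.append(sorted(current_row, key=lambda x: x[0]))
--     return rows
-- ===== SOURCE B (Python) =====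
-- def group_circles(circles):
--     s = sorted(circles, key=lambda c: (c[1], c[0]))
--
--     def rows(lst):
--         # peel off the maximal leading run (consecutive y-gaps < 50), recurse on the rest
--         if not lst:
--             return []
--         i = 1
--         while i < len(lst) and abs(lst[i][1] - lst[i - 1][1]) < 50:
--             i += 1
--         return [sorted(lst[:i], key=lambda c: c[0])] + rows(lst[i:])
--
--     return rows(s)
-- ===== Notes on version B (the rewrite author's own statement) =====
-- stated objective: alternative
-- what changed: A's single accumulator loop over rows/current_row/last_y with a trailing flush is replaced by a recursive decomposition that peels off the maximal leading run of small y-gaps, sorts it, and recurses on the remainder.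
import Mathlib
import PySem

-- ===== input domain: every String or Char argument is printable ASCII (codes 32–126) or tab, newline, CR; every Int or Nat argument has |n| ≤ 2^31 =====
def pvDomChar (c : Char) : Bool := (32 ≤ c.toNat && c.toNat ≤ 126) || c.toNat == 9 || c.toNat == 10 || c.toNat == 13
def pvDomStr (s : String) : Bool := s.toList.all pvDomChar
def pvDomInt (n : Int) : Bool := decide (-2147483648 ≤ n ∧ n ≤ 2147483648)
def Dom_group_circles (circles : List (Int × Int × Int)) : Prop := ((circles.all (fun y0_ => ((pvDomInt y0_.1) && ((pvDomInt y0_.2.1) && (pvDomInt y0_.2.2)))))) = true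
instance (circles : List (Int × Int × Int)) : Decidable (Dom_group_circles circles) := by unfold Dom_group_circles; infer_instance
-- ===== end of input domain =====

-- B replaces A's accumulator loop (rows/current_row/last_y + trailing flush) by a recursion that
-- peels off the maximal leading run of small y-gaps; same cost, different decomposition.


-- ===== PORT A =====
-- loop body of A's for-loop: state is (rows, current_row, last_y)
def pvStepA (st : List (List (Int × Int × Int)) × List (Int × Int × Int) × Option Int)
    (c : Int × Int × Int) :
    List (List (Int × Int × Int)) × List (Int × Int × Int) × Option Int :=
  match st with
  | (rows, cur, lastY) =>
    match lastY with
    | none => (rows, cur ++ [c], some c.2.1)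
    | some ly =>
      if |c.2.1 - ly| < 50 then (rows, cur ++ [c], some c.2.1)
      else (rows ++ [PySem.List.sorted cur (fun x => x.1)], [c], some c.2.1)

-- the trailing 'if current_row: rows.append(...)'
def pvFinishA (st : List (List (Int × Int × Int)) × List (Int × Int × Int) × Option Int) :
    List (List (Int × Int × Int)) :=
  if st.2.1 ≠ [] then st.1 ++ [PySem.List.sorted st.2.1 (fun x => x.1)] else st.1

def group_circles (circles : List (Int × Int × Int)) : List (List (Int × Int × Int)) :=
  pvFinishA ((PySem.List.sorted2 circles (fun c => c.2.1) (fun c => c.1)).foldl pvStepA ([], [], none))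

-- ===== PORT B =====
-- the while loop of Source B's rows(): split off the maximal run whose consecutive y-gaps are < 50
def pvSplitRun (prev : Int × Int × Int) :
    List (Int × Int × Int) → List (Int × Int × Int) × List (Int × Int × Int)
  | [] => ([], [])
  | c :: rest =>
    if |c.2.1 - prev.2.1| < 50 then
      let p := pvSplitRun c rest
      (c :: p.1, p.2)
    else ([], c :: rest)

theorem pvSplitRun_len (prev : Int × Int × Int) (l : List (Int × Int × Int)) :
    (pvSplitRun prev l).2.length ≤ l.length := by
  induction l generalizing prev with
  | nil => simp [pvSplitRun]
  | cons c rest ih =>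
    simp only [pvSplitRun]
    split
    · exact le_trans (ih c) (Nat.le_succ _)
    · simp

-- Source B's recursive rows()
def pvRows : List (Int × Int × Int) → List (List (Int × Int × Int))
  | [] => []
  | c :: rest =>
    let p := pvSplitRun c rest
    PySem.List.sorted (c :: p.1) (fun x => x.1) :: pvRows p.2
termination_by l => l.length
decreasing_by
  exact Nat.lt_succ_of_le (pvSplitRun_len c rest)

def group_circles_alt (circles : List (Int × Int × Int)) : List (List (Int × Int × Int)) :=
  pvRows (PySem.List.sorted2 circles (fun c => c.2.1) (fun c => c.1))

-- ===== PRECONDITION & SPEC =====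
def Spec_group_circles (circles : List (Int × Int × Int)) (out : List (List (Int × Int × Int))) : Prop := out = group_circles_alt circles
instance (circles : List (Int × Int × Int)) (out : List (List (Int × Int × Int))) : Decidable (Spec_group_circles circles out) := by unfold Spec_group_circles; infer_instance

-- ===== CLAIM (what is proved, stated in full; the proofs are below) =====
def Claim_equal_group_circles : Prop := ∀ (circles : List (Int × Int × Int)), Dom_group_circles circles → Spec_group_circles circles (group_circles circles)

-- ===== LEMMAS AND PROOFS =====

-- loop invariant: once the accumulator holds a nonempty current row ending in prev (so last_y = prev's y),
-- finishing A's fold yields the emitted rows followed by B's run decomposition of the rest.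
theorem pvLoop_eq (l : List (Int × Int × Int)) :
    ∀ (prev : Int × Int × Int) (cur : List (Int × Int × Int))
      (rows : List (List (Int × Int × Int))), cur ≠ [] →
    pvFinishA (l.foldl pvStepA (rows, cur, some prev.2.1)) =
      rows ++ (PySem.List.sorted (cur ++ (pvSplitRun prev l).1) (fun x => x.1)
               :: pvRows (pvSplitRun prev l).2) := by
  induction l with
  | nil =>
    intro prev cur rows hcur
    simp [pvSplitRun, pvFinishA, pvRows, hcur]
  | cons c rest ih =>
    intro prev cur rows hcur
    simp only [List.foldl_cons, pvStepA, pvSplitRun]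
    split
    · rw [ih c (cur ++ [c]) rows (by simp)]
      simp
    · rw [ih c [c] (rows ++ [PySem.List.sorted cur (fun x => x.1)]) (by simp)]
      simp [pvRows]

-- ===== VERDICT (by name: the statement is the Claim_ definition above) =====
theorem group_circles_spec : Claim_equal_group_circles := by
  intro circles _
  unfold Spec_group_circles group_circles group_circles_alt
  cases h : PySem.List.sorted2 circles (fun c => c.2.1) (fun c => c.1) with
  | nil => simp [pvFinishA, pvRows]
  | cons c rest =>
    simp only [List.foldl_cons, pvStepA, List.nil_append]
    rw [pvLoop_eq rest c [c] [] (by simp)]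
    simp [pvRows]
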